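-- pv_equiv track=rewrite | github.com/shasaur/StanceDetector | deyclassifier.py | getAdjectiveOccurance
-- ===== SOURCE A (Python) =====
-- def getAdjectiveOccurance(tokens, adj_indices):
--     adjective_occurrence = []
--
--     # Initialise feature vector as no occurances across the board
--     for w in range(len(adj_indices.keys())):
--         adjective_occurrence.append(False)
--
--     # Fill in the occurrences only based on tweet tokens
--     for w in tokens:
--         if w in adj_indices.keys():
--             adjective_occurrence[adj_indices[w]] = True
--
--         # DOES THE ADJECTIVE KEY SET CONTAIN THIS WORD?
--         # IF SO, CHANGE ITS ENTRY IN THE ADJECTIVE_OCCURANCE ARRAY AT POSITION ADJECTIVES.GET_VALUE(WORD)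
--
--     return adjective_occurrence
-- ===== SOURCE B (Python) =====
-- def getAdjectiveOccurance(tokens, adj_indices):
--     # Loop inversion: build a membership set of the tokens once, then drive the
--     # loop by the dict items; marking result[idx] for every adjective present.
--     present = set(tokens)
--     result = [False] * len(adj_indices)
--     for word, idx in adj_indices.items():
--         if word in present:
--             result[idx] = True
--     return result
-- ===== Notes on version B (the rewrite author's own statement) =====
-- stated objective: alternative
-- what changed: Inverts the loop structure: instead of iterating over tokens and looking each token up in the dict, B builds a set of the tokens once and iterates over the dict items, marking result[idx] for every adjective word found in that set.
import Mathlib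
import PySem

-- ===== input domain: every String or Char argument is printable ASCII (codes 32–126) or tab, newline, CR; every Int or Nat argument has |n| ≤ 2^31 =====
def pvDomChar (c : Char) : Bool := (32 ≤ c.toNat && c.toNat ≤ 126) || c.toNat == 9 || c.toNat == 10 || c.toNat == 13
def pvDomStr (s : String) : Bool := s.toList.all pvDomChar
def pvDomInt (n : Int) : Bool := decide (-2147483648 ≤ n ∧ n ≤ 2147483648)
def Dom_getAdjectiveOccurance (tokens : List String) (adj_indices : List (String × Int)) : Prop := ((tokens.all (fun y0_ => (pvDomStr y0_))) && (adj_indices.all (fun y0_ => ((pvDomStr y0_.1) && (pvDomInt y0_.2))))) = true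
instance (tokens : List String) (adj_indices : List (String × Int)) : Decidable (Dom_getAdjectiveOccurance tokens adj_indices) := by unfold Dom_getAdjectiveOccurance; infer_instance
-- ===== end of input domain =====

-- B inverts the loop structure: a membership set of the tokens is built once and the dict items
-- drive the loop, instead of looking every token up in the dict; return values agree on Pre_.

-- ===== PORT A =====
def getAdjectiveOccurance (tokens : List String) (adj_indices : List (String × Int)) : List Bool :=
  let d := PySem.Dict.ofList adj_indices
  -- for w in range(len(adj_indices.keys())): adjective_occurrence.append(False)
  let init := (PySem.List.pyRange 0 (d.size : Int) 1).foldl (fun acc _ => acc ++ [false]) []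
  -- for w in tokens: if w in adj_indices.keys(): adjective_occurrence[adj_indices[w]] = True
  tokens.foldl (fun occ w =>
    if d.contains w then PySem.List.pySetD occ (d.getD w 0) true else occ) init

-- ===== PORT B =====
def getAdjectiveOccurance_alt (tokens : List String) (adj_indices : List (String × Int)) : List Bool :=
  let present := PySem.Set.ofList tokens
  let d := PySem.Dict.ofList adj_indices
  -- result = [False] * len(adj_indices)
  let result := List.replicate d.size false
  -- for word, idx in adj_indices.items(): if word in present: result[idx] = True
  d.items.foldl (fun res p =>
    if PySem.Set.contains present p.1 then PySem.List.pySetD res p.2 true else res) result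

-- ===== PRECONDITION & SPEC =====
-- Pre_ excludes exactly the inputs where the Python raises IndexError (both A and B do): a dict
-- entry whose word occurs in tokens but whose index is out of range for the result vector.
def Pre_getAdjectiveOccurance (tokens : List String) (adj_indices : List (String × Int)) : Prop :=
  ∀ p ∈ (PySem.Dict.ofList adj_indices).items, p.1 ∈ tokens →
    PySem.Raise.InRange (PySem.Dict.ofList adj_indices).size p.2
instance (tokens : List String) (adj_indices : List (String × Int)) : Decidable (Pre_getAdjectiveOccurance tokens adj_indices) := by unfold Pre_getAdjectiveOccurance; infer_instance
def pvWitness_getAdjectiveOccurance : List String × (List (String × Int)) := (["hot", "x"], [("hot", 0), ("cold", 1)])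

def Spec_getAdjectiveOccurance (tokens : List String) (adj_indices : List (String × Int)) (out : List Bool) : Prop := out = getAdjectiveOccurance_alt tokens adj_indices
instance (tokens : List String) (adj_indices : List (String × Int)) (out : List Bool) : Decidable (Spec_getAdjectiveOccurance tokens adj_indices out) := by unfold Spec_getAdjectiveOccurance; infer_instance

-- ===== CLAIM (what is proved, stated in full; the proofs are below) =====
def Claim_equal_getAdjectiveOccurance : Prop := ∀ (tokens : List String) (adj_indices : List (String × Int)), Dom_getAdjectiveOccurance tokens adj_indices → Pre_getAdjectiveOccurance tokens adj_indices → Spec_getAdjectiveOccurance tokens adj_indices (getAdjectiveOccurance tokens adj_indices)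

-- ===== LEMMAS AND PROOFS =====

-- pySetD on an in-range (possibly negative) index is List.set at the normalised position.
theorem pySetD_inRange (xs : List Bool) (i : Int) (v : Bool) (h : PySem.Raise.InRange xs.length i) :
    PySem.List.pySetD xs i v = xs.set (if i < 0 then i + xs.length else i).toNat v := by
  simp only [PySem.Raise.InRange] at h
  simp only [PySem.List.pySetD, PySem.List.pySet?, PySem.List.pyIdx?]
  split_ifs with h1 h2 h3 <;> simp_all
  · omega
  · congr 1; omega

theorem mapRange_set (n k : Nat) (f : Nat → Bool) :
    ((List.range n).map f).set k true = (List.range n).map (fun j => if j = k then true else f j) := by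
  apply List.ext_getElem
  · simp
  · intro j h1 h2
    simp only [List.getElem_set, List.getElem_map, List.getElem_range]
    by_cases hjk : j = k
    · simp [hjk]
    · simp [hjk, Ne.symm hjk]

-- the normalised (Python negative-wrap) index
def posIdx (n : Nat) (i : Int) : Nat := (if i < 0 then i + n else i).toNat

-- a fold of set-to-true operations marks exactly the normalised indices of the list
theorem setfold (n : Nat) : ∀ (idxs : List Int) (f : Nat → Bool),
    (∀ i ∈ idxs, PySem.Raise.InRange n i) →
    idxs.foldl (fun r i => PySem.List.pySetD r i true) ((List.range n).map f)
      = (List.range n).map (fun j => f j || idxs.any (fun i => posIdx n i == j)) := by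
  intro idxs
  induction idxs with
  | nil => intro f _; simp
  | cons i rest ih =>
    intro f h
    have hi := h i (by simp)
    have hlen : ((List.range n).map f).length = n := by simp
    simp only [List.foldl_cons]
    rw [pySetD_inRange _ _ _ (by rw [hlen]; exact hi)]
    rw [hlen, show (if i < 0 then i + (n:Int) else i).toNat = posIdx n i from rfl,
        mapRange_set n _ f, ih _ (fun j hj => h j (by simp [hj]))]
    apply List.map_congr_left
    intro j hj
    simp only [List.any_cons]
    by_cases hji : j = posIdx n i
    · simp [hji]
    · have hne : (posIdx n i == j) = false := by simp [Ne.symm hji]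
      simp [hji, hne]

-- a guarded fold is a fold over the filtered-and-mapped list
theorem foldl_if_filter_map {α β γ : Type} (c : α → Bool) (h : α → β) (g : γ → β → γ) :
    ∀ (l : List α) (s : γ),
      l.foldl (fun s w => if c w then g s (h w) else s) s = ((l.filter c).map h).foldl g s := by
  intro l
  induction l with
  | nil => intro s; rfl
  | cons x xs ih =>
    intro s
    by_cases hc : c x = true
    · simp [hc, ih]
    · simp only [Bool.not_eq_true] at hc
      simp [hc, ih]

-- A's hit indices (token-driven) and B's hit indices (item-driven) have the same members
theorem memAB (tokens : List String) (adj_indices : List (String × Int)) (x : Int) :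
    (x ∈ ((tokens.filter (fun w => (PySem.Dict.ofList adj_indices).contains w)).map
        (fun w => (PySem.Dict.ofList adj_indices).getD w 0))) ↔
    (x ∈ (((PySem.Dict.ofList adj_indices).items.filter
        (fun p => PySem.Set.contains (PySem.Set.ofList tokens) p.1)).map (fun p => p.2))) := by
  have hnd := PySem.Dict.nodup_keys_ofList (κ := String) (ν := Int) adj_indices
  simp only [List.mem_map, List.mem_filter]
  constructor
  · rintro ⟨w, ⟨hw, hc⟩, hx⟩
    have hs : ((PySem.Dict.ofList adj_indices).get? w).isSome := by
      rw [← PySem.Dict.contains_eq_isSome_get?]; exact hc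
    obtain ⟨v, hv⟩ := Option.isSome_iff_exists.mp hs
    have hvx : v = x := by
      rw [PySem.Dict.getD_eq_get?_getD, hv] at hx; simpa using hx
    refine ⟨(w, x), ⟨?_, ?_⟩, rfl⟩
    · exact PySem.Dict.mem_items_of_get?_eq_some _ (hvx ▸ hv)
    · rw [PySem.Set.contains_iff]; rw [PySem.Set.mem_ofList]; exact hw
  · rintro ⟨⟨k, v⟩, ⟨hp, hc⟩, hx⟩
    have hw : k ∈ tokens := by
      rw [PySem.Set.contains_iff, PySem.Set.mem_ofList] at hc; exact hc
    have hget : (PySem.Dict.ofList adj_indices).get? k = some v :=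
      PySem.Dict.get?_of_mem_items _ hp hnd
    refine ⟨k, ⟨hw, ?_⟩, ?_⟩
    · rw [PySem.Dict.contains_eq_isSome_get?, hget]; rfl
    · rw [PySem.Dict.getD_eq_get?_getD, hget]; simpa using hx

theorem main_eq (tokens : List String) (adj_indices : List (String × Int))
    (hpre : ∀ p ∈ (PySem.Dict.ofList adj_indices).items, p.1 ∈ tokens →
      PySem.Raise.InRange (PySem.Dict.ofList adj_indices).size p.2) :
    getAdjectiveOccurance tokens adj_indices = getAdjectiveOccurance_alt tokens adj_indices := by
  unfold getAdjectiveOccurance getAdjectiveOccurance_alt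
  simp only []
  set d := PySem.Dict.ofList adj_indices with hd
  set n := d.size with hn
  have hinit : (PySem.List.pyRange 0 (n : Int) 1).foldl (fun acc _ => acc ++ [false]) []
      = (List.range n).map (fun _ => false) := by
    rw [PySem.List.pyRange_zero_nat]
    rw [PySem.List.foldl_append_singleton_eq_map (f := fun _ => false)]
    simp
  have hrepl : List.replicate n false = (List.range n).map (fun _ => false) := by
    simp [List.map_const']
  rw [hinit, hrepl]
  rw [foldl_if_filter_map (fun w => d.contains w) (fun w => d.getD w 0)
        (fun r i => PySem.List.pySetD r i true) tokens]
  rw [foldl_if_filter_map (fun p => PySem.Set.contains (PySem.Set.ofList tokens) p.1)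
        (fun p => p.2) (fun r i => PySem.List.pySetD r i true) d.items]
  have hA : ∀ i ∈ (tokens.filter (fun w => d.contains w)).map (fun w => d.getD w 0),
      PySem.Raise.InRange n i := by
    intro i hi
    rw [memAB] at hi
    simp only [List.mem_map, List.mem_filter] at hi
    obtain ⟨p, ⟨hp, hc⟩, hx⟩ := hi
    have hw : p.1 ∈ tokens := by
      rw [PySem.Set.contains_iff, PySem.Set.mem_ofList] at hc; exact hc
    exact hx ▸ hpre p hp hw
  have hB : ∀ i ∈ ((d.items.filter
      (fun p => PySem.Set.contains (PySem.Set.ofList tokens) p.1)).map (fun p => p.2)),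
      PySem.Raise.InRange n i := by
    intro i hi
    rw [← memAB] at hi
    exact hA i hi
  rw [setfold n _ _ hA, setfold n _ _ hB]
  apply List.map_congr_left
  intro j hj
  simp only [Bool.false_or]
  rw [Bool.eq_iff_iff, List.any_eq_true, List.any_eq_true]
  constructor
  · rintro ⟨x, hx, hpx⟩; exact ⟨x, (memAB tokens adj_indices x).mp hx, hpx⟩
  · rintro ⟨x, hx, hpx⟩; exact ⟨x, (memAB tokens adj_indices x).mpr hx, hpx⟩

-- ===== VERDICT (by name: the statement is the Claim_ definition above) =====
theorem getAdjectiveOccurance_spec : Claim_equal_getAdjectiveOccurance := by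
  intro tokens adj_indices _ hpre
  unfold Spec_getAdjectiveOccurance
  exact main_eq tokens adj_indices hpre
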